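-- pv_equiv track=rewrite | github.com/bimalgaudel/codes | python/schro.py | symbolize
-- ===== SOURCE A (Python) =====
-- SYMBOLS = set("""
--     H He Li Be B C N O F Ne Na Mg Al Si P S Cl Ar K Ca Sc Ti V Cr Mn Fe Co Ni Cu
--     Zn Ga Ge As Se Br Kr Rb Sr Y Zr Nb Mo Tc Ru Rh Pd Ag Cd In Sn Sb Te I Xe Cs
--     Ba La Ce Pr Nd Pm Sm Eu Gd Tb Dy Ho Er Tm Yb Lu Hf Ta W Re Os Ir Pt Au Hg Tl
--     Pb Bi Po At Rn Fr Ra Ac Th Pa U Np Pu Am Cm Bk Cf Es Fm Md No Lr Rf Db Sg Bh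
--     Hs Mt Ds Rg Nh Nh Fl Mc Lv Ts Og
-- """.split())
--
-- def symbolize(name):
--     """
--     Returns a sorted list of all the ways (if any) in which the name can be
--     written using chemical symbols. The name is case-insensitive, but the
--     return values should respect the case of the chemical symbols.
--     """
--
--     # symbolize("ne") == ["Ne"]
--     # symbolize("e") == [""]
--     # symbolize("") == [""]
--
--     output = []
--     if name[0].upper() in SYMBOLS:
--         if len(name) <= 1:
--             output += [name[0].upper()]
--         else:
--             output += [name[0].upper() + i for i in symbolize(name[1:])]
--
--     if len(name) > 1 and name[0].upper() + name[1].lower() in SYMBOLS: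
--         if len(name) <= 2:
--             output += [name[0].upper() + name[1].lower()]
--         else:
--             output += [name[0].upper() + name[1].lower() + i for i in symbolize(name[2:])]
--
--     return output
-- ===== SOURCE B (Python) =====
-- SYMBOLS = set("""
--     H He Li Be B C N O F Ne Na Mg Al Si P S Cl Ar K Ca Sc Ti V Cr Mn Fe Co Ni Cu
--     Zn Ga Ge As Se Br Kr Rb Sr Y Zr Nb Mo Tc Ru Rh Pd Ag Cd In Sn Sb Te I Xe Cs
--     Ba La Ce Pr Nd Pm Sm Eu Gd Tb Dy Ho Er Tm Yb Lu Hf Ta W Re Os Ir Pt Au Hg Tl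
--     Pb Bi Po At Rn Fr Ra Ac Th Pa U Np Pu Am Cm Bk Cf Es Fm Md No Lr Rf Db Sg Bh
--     Hs Mt Ds Rg Nh Nh Fl Mc Lv Ts Og
-- """.split())
--
-- def symbolize(name):
--     # Bottom-up DP over suffixes: dp[i] holds all decompositions of name[i:].
--     n = len(name)
--     dp = [None] * (n + 1)
--     dp[n] = [""]
--     for i in range(n - 1, -1, -1):
--         res = []
--         one = name[i].upper()
--         if one in SYMBOLS:
--             res += [one + s for s in dp[i + 1]]
--         if i + 1 < n:
--             two = one + name[i + 1].lower()
--             if two in SYMBOLS: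
--                 res += [two + s for s in dp[i + 2]]
--         dp[i] = res
--     return dp[0]
-- ===== Notes on version B (the rewrite author's own statement) =====
-- stated objective: faster
-- what changed: Replaces A's plain recursion, which recomputes the decomposition list of each suffix exponentially many times, by a bottom-up dynamic program that fills dp[i] (all decompositions of name[i:]) once from the end of the string.
import Mathlib
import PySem

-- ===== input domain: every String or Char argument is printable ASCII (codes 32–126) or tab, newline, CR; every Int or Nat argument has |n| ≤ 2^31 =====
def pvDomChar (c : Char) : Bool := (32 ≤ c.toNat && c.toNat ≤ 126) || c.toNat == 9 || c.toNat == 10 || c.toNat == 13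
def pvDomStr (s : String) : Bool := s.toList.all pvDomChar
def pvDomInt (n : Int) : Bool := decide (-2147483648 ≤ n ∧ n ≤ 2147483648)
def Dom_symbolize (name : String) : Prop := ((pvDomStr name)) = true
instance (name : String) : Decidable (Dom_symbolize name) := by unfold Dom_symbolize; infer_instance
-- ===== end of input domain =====

-- B replaces A's recursion (which recomputes each suffix's decompositions many times) by a
-- bottom-up DP over suffixes computing each entry once; strings are handled on the list-of-chars side.

-- ===== PORT A =====
-- Python's SYMBOLS = set("...".split()): distinct symbols, insertion order (PySem.Set).
def SYMBOLS : PySem.Set String := PySem.Set.ofList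
  ["H", "He", "Li", "Be", "B", "C", "N", "O", "F", "Ne", "Na", "Mg", "Al", "Si", "P", "S",
   "Cl", "Ar", "K", "Ca", "Sc", "Ti", "V", "Cr", "Mn", "Fe", "Co", "Ni", "Cu", "Zn", "Ga",
   "Ge", "As", "Se", "Br", "Kr", "Rb", "Sr", "Y", "Zr", "Nb", "Mo", "Tc", "Ru", "Rh", "Pd",
   "Ag", "Cd", "In", "Sn", "Sb", "Te", "I", "Xe", "Cs", "Ba", "La", "Ce", "Pr", "Nd", "Pm",
   "Sm", "Eu", "Gd", "Tb", "Dy", "Ho", "Er", "Tm", "Yb", "Lu", "Hf", "Ta", "W", "Re", "Os",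
   "Ir", "Pt", "Au", "Hg", "Tl", "Pb", "Bi", "Po", "At", "Rn", "Fr", "Ra", "Ac", "Th", "Pa",
   "U", "Np", "Pu", "Am", "Cm", "Bk", "Cf", "Es", "Fm", "Md", "No", "Lr", "Rf", "Db", "Sg",
   "Bh", "Hs", "Mt", "Ds", "Rg", "Nh", "Nh", "Fl", "Mc", "Lv", "Ts", "Og"]

-- A's recursion, on the char-list side (each result string is a List Char).
-- On [] Python's name[0] raises IndexError (excluded by Pre_); the port returns [] there.
-- The single-char case is A's code with the (always-empty) two-char branch specialized away.
def symAL : List Char → List (List Char)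
  | [] => []
  | [c] =>
    if String.mk [PySem.Chars.upperChar c] ∈ SYMBOLS then [[PySem.Chars.upperChar c]] else []
  | c :: d :: rest2 =>
    let u := PySem.Chars.upperChar c
    let v := PySem.Chars.lowerChar d
    let out1 : List (List Char) :=
      if String.mk [u] ∈ SYMBOLS then (symAL (d :: rest2)).map (fun i => u :: i) else []
    let out2 : List (List Char) :=
      if String.mk [u, v] ∈ SYMBOLS then
        match rest2 with
        | [] => [[u, v]]
        | _ :: _ => (symAL rest2).map (fun i => u :: v :: i)
      else []
    out1 ++ out2

def symbolize (name : String) : List String :=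
  (symAL name.toList).map (fun l => String.mk l)

-- ===== PORT B =====
-- B's DP table, built back to front: symB l = [dp_0, dp_1, …, dp_n] for the suffixes of l,
-- where dp_i lists all decompositions of the suffix starting at i (B's loop as structural recursion).
def symB : List Char → List (List (List Char))
  | [] => [[[]]]
  | c :: rest =>
    let tl := symB rest
    let dp1 := tl.headD []
    let u := PySem.Chars.upperChar c
    let res1 : List (List Char) :=
      if String.mk [u] ∈ SYMBOLS then dp1.map (fun s => u :: s) else []
    let res2 : List (List Char) :=
      match rest with
      | [] => []
      | d :: _ =>
        let dp2 := tl.tail.headD []    -- B's dp[i+2] (rest nonempty ⇒ the table has it)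
        if String.mk [u, PySem.Chars.lowerChar d] ∈ SYMBOLS then
          dp2.map (fun s => u :: PySem.Chars.lowerChar d :: s)
        else []
    (res1 ++ res2) :: tl

def symbolize_alt (name : String) : List String :=
  ((symB name.toList).headD []).map (fun l => String.mk l)

-- ===== PRECONDITION & SPEC =====
-- Pre_ excludes exactly the empty string, on which A raises IndexError (name[0]).
def Pre_symbolize (name : String) : Prop := name ≠ ""
instance (name : String) : Decidable (Pre_symbolize name) := by unfold Pre_symbolize; infer_instance
def pvWitness_symbolize : String := "genes"

def Spec_symbolize (name : String) (out : List String) : Prop := out = symbolize_alt name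
instance (name : String) (out : List String) : Decidable (Spec_symbolize name out) := by unfold Spec_symbolize; infer_instance


-- ===== CLAIM (what is proved, stated in full; the proofs are below) =====
def Claim_equal_symbolize : Prop := ∀ (name : String), Dom_symbolize name → Pre_symbolize name → Spec_symbolize name (symbolize name)

-- ===== LEMMAS AND PROOFS =====

-- One-step characterization of the head of B's DP table (dp_0 in terms of dp_1 and dp_2).
set_option maxRecDepth 40000 in
theorem symB_head (c : Char) (rest : List Char) :
    (symB (c :: rest)).headD [] =
      (if String.mk [PySem.Chars.upperChar c] ∈ SYMBOLS then
        ((symB rest).headD []).map (fun s => PySem.Chars.upperChar c :: s) else []) ++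
      (match rest with
       | [] => []
       | d :: rest2 =>
         if String.mk [PySem.Chars.upperChar c, PySem.Chars.lowerChar d] ∈ SYMBOLS then
           ((symB rest2).headD []).map
             (fun s => PySem.Chars.upperChar c :: PySem.Chars.lowerChar d :: s)
         else []) := by
  cases rest <;> rfl

-- Key invariant: on a nonempty string the head of B's DP table is exactly A's result.
set_option maxRecDepth 40000 in
theorem key : (l : List Char) → l ≠ [] → symAL l = (symB l).headD []
  | [c], _ => by
    rw [symB_head]
    simp [symAL, symB]
  | c :: d :: rest2, _ => by
    have h1 : symAL (d :: rest2) = (symB (d :: rest2)).headD [] :=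
      key (d :: rest2) (by simp)
    rw [symB_head]
    cases rest2 with
    | nil =>
      simp only [symAL, ← h1]
      rfl
    | cons e rs =>
      have h2 : symAL (e :: rs) = (symB (e :: rs)).headD [] := key (e :: rs) (by simp)
      simp only [symAL, ← h1, ← h2]
termination_by l => l.length

-- ===== VERDICT (by name: the statement is the Claim_ definition above) =====
theorem symbolize_spec : Claim_equal_symbolize := by
  intro name _ hpre
  unfold Spec_symbolize symbolize symbolize_alt
  have hl : name.toList ≠ [] := by
    intro h
    exact hpre (by rwa [← String.toList_eq_nil_iff])
  rw [key name.toList hl]
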